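-- pv_equiv track=rewrite | github.com/Xuyuanp/leetcode-2021 | 0646.maximum-length-of-pair-chain.py | findlongestchain2
-- ===== SOURCE A (Python) =====
-- from typing import List
--
-- def findlongestchain2(pairs: List[List[int]]) -> int:
--     pairs.sort(key=lambda p: p[1])
--     lis = [pairs[0]]
--
--     def binary_search(val: int) -> int:
--         left, right = 0, len(lis)
--         while left < right:
--             mid = (left + right) // 2
--             if lis[mid][1] < val:
--                 left = mid + 1
--             else:
--                 right = mid
--         return left
--
--     for pair in pairs[1:]:
--         pos = binary_search(pair[0])
--         if pos == len(
--             lis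
--         ):  # binary search is not needed. only compare with lis[-1] ==> greedy
--             # tails[-1]: |--------|
--             # case1:                 |-----|     -> append
--             lis.append(pair)
--         # else:
--         # tails[pos]:   |-------|
--         # case1          |---------|     -> drop
--     return len(lis)
-- ===== SOURCE B (Python) =====
-- from typing import List
--
-- def findlongestchain2(pairs: List[List[int]]) -> int:
--     # Same in-place sort by pair end as A, then a plain greedy scan with a
--     # counter and the current chain end -- no tails list, no binary search.
--     pairs.sort(key=lambda p: p[1])
--     count = 1
--     cur_end = pairs[0][1]
--     for pair in pairs[1:]:
--         if pair[0] > cur_end: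
--             count += 1
--             cur_end = pair[1]
--     return count
-- ===== Notes on version B (the rewrite author's own statement) =====
-- stated objective: simpler
-- what changed: Replaces A's maintained tails list with an inner binary search per pair by the standard greedy interval-scheduling scan keeping only a counter and the current chain end; Pre_ excludes the empty list and inner lists shorter than 2, on which A raises IndexError.
import Mathlib
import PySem

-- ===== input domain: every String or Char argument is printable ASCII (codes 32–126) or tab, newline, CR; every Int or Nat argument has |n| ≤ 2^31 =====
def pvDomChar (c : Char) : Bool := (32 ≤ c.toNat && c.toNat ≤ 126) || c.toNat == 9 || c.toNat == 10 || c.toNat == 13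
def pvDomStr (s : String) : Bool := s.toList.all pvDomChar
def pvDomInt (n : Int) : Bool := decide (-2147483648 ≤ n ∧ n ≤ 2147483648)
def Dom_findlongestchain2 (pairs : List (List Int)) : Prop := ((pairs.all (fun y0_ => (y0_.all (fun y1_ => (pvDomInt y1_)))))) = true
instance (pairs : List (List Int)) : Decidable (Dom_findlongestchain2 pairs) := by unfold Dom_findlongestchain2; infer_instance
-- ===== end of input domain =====

-- B replaces A's tails list + inner binary search by the standard greedy scan
-- (counter + current chain end) after the same in-place sort by pair end; the
-- equivalence is about the return value (both sort `pairs` in place in Python).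

-- ===== PORT A =====
-- p[1] and p[0]; under Pre_ every inner list has length ≥ 2, so getD never hits its default
def pvEnd (p : List Int) : Int := p.getD 1 0
def pvStart (p : List Int) : Int := p.getD 0 0

-- A's hand-written binary search loop `while left < right: …`; the fuel
-- `right - left` is a termination guard only (the gap shrinks every iteration),
-- it never changes the computed value.
def pvBSGo (lis : List (List Int)) (val : Int) : Nat → Nat → Nat → Nat
  | 0, left, _ => left
  | fuel + 1, left, right =>
    if left < right then
      -- mid = (left + right) // 2, inlined
      if pvEnd (lis.getD ((left + right) / 2) []) < val then
        pvBSGo lis val fuel ((left + right) / 2 + 1) right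
      else pvBSGo lis val fuel left ((left + right) / 2)
    else left

def pvBS (lis : List (List Int)) (val : Int) (left right : Nat) : Nat :=
  pvBSGo lis val (right - left) left right

def findlongestchain2 (pairs : List (List Int)) : Int :=
  let ps := PySem.List.sorted pairs (fun p => pvEnd p) false
  -- lis = [pairs[0]]; pairs[0] raises on the empty list, excluded by Pre_
  let lis := (ps.drop 1).foldl
    (fun lis pair =>
      if pvBS lis (pvStart pair) 0 lis.length = lis.length then lis ++ [pair] else lis)
    [ps.headD []]
  (lis.length : Int)

-- ===== PORT B =====
def findlongestchain2_alt (pairs : List (List Int)) : Int :=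
  let ps := PySem.List.sorted pairs (fun p => pvEnd p) false
  -- state (count, cur_end); pairs[0][1] raises on the empty list, excluded by Pre_
  let s := (ps.drop 1).foldl
    (fun (s : Int × Int) pair =>
      if pvStart pair > s.2 then (s.1 + 1, pvEnd pair) else s)
    (1, pvEnd (ps.headD []))
  s.1

-- ===== PRECONDITION & SPEC =====
-- Pre_ excludes exactly the inputs where the Python A raises IndexError:
-- the empty list (pairs[0]) and inner lists of length < 2 (p[1] in the sort key / pair[0]).
def Pre_findlongestchain2 (pairs : List (List Int)) : Prop :=
  pairs ≠ [] ∧ ∀ p ∈ pairs, 2 ≤ p.length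
instance (pairs : List (List Int)) : Decidable (Pre_findlongestchain2 pairs) := by
  unfold Pre_findlongestchain2; infer_instance
def pvWitness_findlongestchain2 : List (List Int) := [[1, 2], [3, 4], [2, 3]]

def Spec_findlongestchain2 (pairs : List (List Int)) (out : Int) : Prop := out = findlongestchain2_alt pairs
instance (pairs : List (List Int)) (out : Int) : Decidable (Spec_findlongestchain2 pairs out) := by unfold Spec_findlongestchain2; infer_instance

-- ===== CLAIM (what is proved, stated in full; the proofs are below) =====
def Claim_equal_findlongestchain2 : Prop := ∀ (pairs : List (List Int)), Dom_findlongestchain2 pairs → Pre_findlongestchain2 pairs → Spec_findlongestchain2 pairs (findlongestchain2 pairs)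

-- ===== LEMMAS AND PROOFS =====

-- the binary-search result never exceeds `right`
theorem pvBS_le (lis : List (List Int)) (val : Int) :
    ∀ n l r, r - l ≤ n → l ≤ r → pvBSGo lis val n l r ≤ r := by
  intro n
  induction n with
  | zero => intro l r h1 h2; simp only [pvBSGo]; exact h2
  | succ n ih =>
    intro l r h1 h2
    simp only [pvBSGo]
    split
    · split
      · exact le_trans (ih _ _ (by omega) (by omega)) le_rfl
      · exact le_trans (ih _ _ (by omega) (by omega)) (by omega)
    · omega

-- if every end is < val, the search runs off the right edge
theorem pvBS_of_all_lt (lis : List (List Int)) (val : Int)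
    (hall : ∀ i (h : i < lis.length), pvEnd lis[i] < val) :
    ∀ n l r, r - l ≤ n → l ≤ r → r ≤ lis.length → pvBSGo lis val n l r = r := by
  intro n
  induction n with
  | zero => intro l r h1 h2 h3; simp only [pvBSGo]; omega
  | succ n ih =>
    intro l r h1 h2 h3
    simp only [pvBSGo]
    split
    · have hm : (l + r) / 2 < lis.length := by omega
      rw [List.getD_eq_getElem lis [] hm]
      rw [if_pos (hall _ hm)]
      exact ih _ _ (by omega) (by omega) h3
    · omega

-- on a list sorted by end, result = length forces every end in [l, length) below val
theorem pvBS_all_lt (lis : List (List Int)) (val : Int)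
    (hp : lis.Pairwise (fun a b => pvEnd a ≤ pvEnd b)) :
    ∀ n l r, r - l ≤ n → l ≤ r → r ≤ lis.length →
      pvBSGo lis val n l r = lis.length →
      ∀ i (hi : i < lis.length), l ≤ i → pvEnd lis[i] < val := by
  intro n
  induction n with
  | zero =>
    intro l r h1 h2 h3 hres i hi hli
    simp only [pvBSGo] at hres; omega
  | succ n ih =>
    intro l r h1 h2 h3 hres i hi hli
    simp only [pvBSGo] at hres
    split at hres
    · have hm : (l + r) / 2 < lis.length := by omega
      set mid := (l + r) / 2 with hmid
      rw [List.getD_eq_getElem lis [] hm] at hres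
      by_cases hc : pvEnd lis[mid] < val
      · rw [if_pos hc] at hres
        by_cases hile : i ≤ mid
        · rcases Nat.lt_or_ge i mid with h | h
          · calc pvEnd lis[i] ≤ pvEnd lis[mid] :=
                  List.pairwise_iff_getElem.mp hp i mid hi hm h
              _ < val := hc
          · have : i = mid := by omega
            subst this; exact hc
        · exact ih _ _ (by omega) (by omega) h3 hres i hi (by omega)
      · rw [if_neg hc] at hres
        have := pvBS_le lis val n l mid (by omega) (by omega)
        omega
    · omega

-- on a nonempty sorted-by-end list the whole search says: last end < val
theorem pvBS_iff (lis : List (List Int)) (val : Int) (hne : lis ≠ [])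
    (hp : lis.Pairwise (fun a b => pvEnd a ≤ pvEnd b)) :
    (pvBS lis val 0 lis.length = lis.length ↔ pvEnd (lis.getLast hne) < val) := by
  have hlen : 0 < lis.length := List.length_pos_of_ne_nil hne
  unfold pvBS
  constructor
  · intro h
    have := pvBS_all_lt lis val hp lis.length 0 lis.length (by omega) (by omega) le_rfl h
      (lis.length - 1) (by omega) (by omega)
    rwa [List.getLast_eq_getElem] 
  · intro h
    apply pvBS_of_all_lt lis val _ lis.length 0 lis.length (by omega) (by omega) le_rfl
    intro i hi
    rcases Nat.lt_or_ge i (lis.length - 1) with hlt | hge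
    · calc pvEnd lis[i] ≤ pvEnd lis[lis.length - 1] :=
            List.pairwise_iff_getElem.mp hp i (lis.length - 1) hi (by omega) hlt
        _ < val := by rwa [List.getLast_eq_getElem] at h
    · have : i = lis.length - 1 := by omega
      subst this
      rwa [List.getLast_eq_getElem] at h

-- the two folds step in lockstep: B's state is (length of A's lis, end of its last element)
theorem fold_eq :
    ∀ (rest lis : List (List Int)) (hne : lis ≠ []),
      (lis ++ rest).Pairwise (fun a b => pvEnd a ≤ pvEnd b) →
      ((rest.foldl
          (fun lis pair =>
            if pvBS lis (pvStart pair) 0 lis.length = lis.length then lis ++ [pair] else lis)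
          lis).length : Int)
        = (rest.foldl
            (fun (s : Int × Int) pair =>
              if pvStart pair > s.2 then (s.1 + 1, pvEnd pair) else s)
            ((lis.length : Int), pvEnd (lis.getLast hne))).1 := by
  intro rest
  induction rest with
  | nil => intro lis hne hp; simp
  | cons pair rest ih =>
    intro lis hne hp
    have hplis : lis.Pairwise (fun a b => pvEnd a ≤ pvEnd b) :=
      (List.pairwise_append.mp hp).1
    simp only [List.foldl_cons]
    by_cases hc : pvEnd (lis.getLast hne) < pvStart pair
    · rw [if_pos ((pvBS_iff lis (pvStart pair) hne hplis).mpr hc),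
        if_pos (by exact hc)]
      have hne' : lis ++ [pair] ≠ [] := by simp
      have hp' : ((lis ++ [pair]) ++ rest).Pairwise (fun a b => pvEnd a ≤ pvEnd b) := by
        rwa [List.append_assoc, List.singleton_append]
      have heq := ih (lis ++ [pair]) hne' hp'
      rw [heq]
      have hinit : (((lis ++ [pair]).length : Int), pvEnd ((lis ++ [pair]).getLast hne'))
          = ((lis.length : Int) + 1, pvEnd pair) := by
        simp
      rw [hinit]
    · rw [if_neg (fun h => hc ((pvBS_iff lis (pvStart pair) hne hplis).mp h)),
        if_neg (by exact hc)]
      exact ih lis hne (hp.sublist (by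
        exact (List.sublist_cons_self pair rest).append_left lis))

-- ===== VERDICT (by name: the statement is the Claim_ definition above) =====
theorem findlongestchain2_spec : Claim_equal_findlongestchain2 := by
  intro pairs _ hpre
  obtain ⟨hne, -⟩ := hpre
  unfold Spec_findlongestchain2 findlongestchain2 findlongestchain2_alt
  set ps := PySem.List.sorted pairs (fun p => pvEnd p) false with hps
  have hpsne : ps ≠ [] := by
    rw [hps]; intro h
    exact hne ((PySem.List.sorted_eq_nil_iff pairs (fun p => pvEnd p) false).mp h)
  obtain ⟨h0, t, hcons⟩ := List.exists_cons_of_ne_nil hpsne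
  have hp : ps.Pairwise (fun a b => pvEnd a ≤ pvEnd b) :=
    PySem.List.sorted_pairwise pairs (fun p => pvEnd p)
  rw [hcons] at hp ⊢
  simp only [List.headD_cons, List.drop_one, List.tail_cons]
  have h1 : ([h0] : List (List Int)) ≠ [] := by simp
  have := fold_eq t [h0] h1 (by simpa using hp)
  simpa using this
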